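-- pv_equiv track=rewrite | github.com/qiancai/ai-pr-translator | scripts/diff_analyzer.py | find_affected_sections
-- ===== SOURCE A (Python) =====
-- def find_affected_sections(lines, changed_lines, all_headers):
--     """Find which sections are affected by the changes"""
--     affected_sections = set()
--
--     for changed_line in changed_lines:
--         # Find the section this changed line belongs to
--         current_section = None
--
--         # Find the most recent header before or at the changed line
--         for line_num in sorted(all_headers.keys()):
--             if line_num <= changed_line:
--                 current_section = line_num
--             else:
--                 break
--
--         if current_section:
--             # Only add the directly affected section (the one that directly contains the change)
--             affected_sections.add(current_section)
--
--     return affected_sections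
-- ===== SOURCE B (Python) =====
-- import bisect
--
-- def find_affected_sections(lines, changed_lines, all_headers):
--     """Find which sections are affected by the changes (sort headers once, binary search per changed line)"""
--     header_lines = sorted(all_headers.keys())
--     affected_sections = set()
--     for changed_line in changed_lines:
--         i = bisect.bisect_right(header_lines, changed_line)
--         current_section = header_lines[i - 1] if i else None
--         if current_section:
--             affected_sections.add(current_section)
--     return affected_sections
-- ===== Notes on version B (the rewrite author's own statement) =====
-- stated objective: faster
-- what changed: A re-sorts the header keys for every changed line and linearly scans the sorted list with a break; B sorts the keys once and answers each changed line with one bisect_right binary search.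
import Mathlib
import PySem

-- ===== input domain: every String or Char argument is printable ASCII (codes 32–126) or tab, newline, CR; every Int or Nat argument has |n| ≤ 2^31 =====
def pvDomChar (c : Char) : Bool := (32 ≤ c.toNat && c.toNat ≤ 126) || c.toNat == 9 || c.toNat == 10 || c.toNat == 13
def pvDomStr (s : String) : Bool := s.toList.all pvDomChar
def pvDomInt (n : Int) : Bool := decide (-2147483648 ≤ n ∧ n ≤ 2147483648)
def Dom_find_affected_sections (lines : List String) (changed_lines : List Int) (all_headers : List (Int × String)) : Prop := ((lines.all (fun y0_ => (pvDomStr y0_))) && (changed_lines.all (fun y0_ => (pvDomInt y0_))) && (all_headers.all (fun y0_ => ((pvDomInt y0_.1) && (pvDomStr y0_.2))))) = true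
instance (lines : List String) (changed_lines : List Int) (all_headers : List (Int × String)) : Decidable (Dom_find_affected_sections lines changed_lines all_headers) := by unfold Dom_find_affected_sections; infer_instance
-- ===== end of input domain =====

-- B replaces A's per-changed-line re-sort + linear scan of the header keys by one sort and a
-- bisect_right binary search per changed line (objective: faster, asymptotic).

-- ===== PORT A =====
-- A's inner loop: 'for line_num in sorted(all_headers.keys()): if line_num <= changed_line:
-- current_section = line_num else: break', started from current_section = None.
def pvScanA (ks : List Int) (c : Int) (cur : Option Int) : Option Int :=
  match ks with
  | [] => cur
  | k :: t => if k ≤ c then pvScanA t c (some k) else cur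

def find_affected_sections (lines : List String) (changed_lines : List Int) (all_headers : List (Int × String)) : List Int :=
  changed_lines.foldl (fun acc changed_line =>
    let current_section := pvScanA (PySem.List.sorted (PySem.Dict.ofList all_headers).keys (fun x => x) false) changed_line none
    -- 'if current_section:' — Python truthiness: None and 0 are falsy
    match current_section with
    | some s => if s ≠ 0 then PySem.Set.add acc s else acc
    | none => acc) PySem.Set.empty

-- ===== PORT B =====
def find_affected_sections_alt (lines : List String) (changed_lines : List Int) (all_headers : List (Int × String)) : List Int :=
  let header_lines := PySem.List.sorted (PySem.Dict.ofList all_headers).keys (fun x => x) false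
  changed_lines.foldl (fun acc changed_line =>
    let i := PySem.List.bisectRight header_lines changed_line
    -- 'header_lines[i - 1] if i else None'
    let current_section : Option Int := if i = 0 then none else header_lines[i - 1]?
    -- 'if current_section:' — Python truthiness: None and 0 are falsy
    match current_section with
    | some s => if s ≠ 0 then PySem.Set.add acc s else acc
    | none => acc) PySem.Set.empty

-- ===== PRECONDITION & SPEC =====
def Spec_find_affected_sections (lines : List String) (changed_lines : List Int) (all_headers : List (Int × String)) (out : List Int) : Prop := out = find_affected_sections_alt lines changed_lines all_headers
instance (lines : List String) (changed_lines : List Int) (all_headers : List (Int × String)) (out : List Int) : Decidable (Spec_find_affected_sections lines changed_lines all_headers out) := by unfold Spec_find_affected_sections; infer_instance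

-- ===== CLAIM (what is proved, stated in full; the proofs are below) =====
def Claim_equal_find_affected_sections : Prop := ∀ (lines : List String) (changed_lines : List Int) (all_headers : List (Int × String)), Dom_find_affected_sections lines changed_lines all_headers → Spec_find_affected_sections lines changed_lines all_headers (find_affected_sections lines changed_lines all_headers)

-- ===== LEMMAS AND PROOFS =====

-- A's scan-with-break returns the last element of the ≤-c prefix, falling back to its accumulator.
theorem pvScanA_eq_takeWhile (ks : List Int) (c : Int) (cur : Option Int) :
    pvScanA ks c cur = ((ks.takeWhile (fun k => decide (k ≤ c))).getLast?).or cur := by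
  induction ks generalizing cur with
  | nil => simp [pvScanA]
  | cons k t ih =>
    by_cases h : k ≤ c
    · rw [pvScanA]
      simp only [h, if_pos, List.takeWhile_cons, ih]
      cases htw : t.takeWhile (fun k => decide (k ≤ c)) with
      | nil => simp
      | cons b r =>
        cases hv : (b :: r).getLast? with
        | none => simp at hv
        | some v => simp [List.getLast?_cons_cons, hv]
    · rw [pvScanA]
      simp [h]

-- the element just after the takeWhile prefix (if any) fails the predicate
theorem takeWhile_stop {α : Type} (p : α → Bool) (l : List α)
    (h : (l.takeWhile p).length < l.length) :
    p (l[(l.takeWhile p).length]'h) = false := by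
  induction l with
  | nil => simp at h
  | cons a t ih =>
    by_cases hp : p a
    · simp only [List.takeWhile_cons, hp, if_pos, List.length_cons] at h ⊢
      simpa using ih (by omega)
    · simp [hp] at h ⊢

-- on a sorted list, bisect_right lands exactly at the end of the ≤-c prefix
theorem bisectRight_eq_takeWhile_length (ks : List Int) (c : Int)
    (hs : ks.Pairwise (fun a b => a ≤ b)) :
    PySem.List.bisectRight ks c = (ks.takeWhile (fun k => decide (k ≤ c))).length := by
  obtain ⟨hle, hlt, hgt⟩ := PySem.List.bisectRight_spec ks c hs
  set n := PySem.List.bisectRight ks c with hn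
  set t := (ks.takeWhile (fun k => decide (k ≤ c))).length with ht
  have htle : t ≤ ks.length := by
    rw [ht]; exact (List.takeWhile_prefix _).length_le
  rcases lt_trichotomy n t with h | h | h
  · exfalso
    have hnlt : n < ks.length := lt_of_lt_of_le h htle
    have := hgt n hnlt le_rfl
    have hmem : ks[n] = (ks.takeWhile (fun k => decide (k ≤ c)))[n]'(by omega) := by
      exact ((List.takeWhile_prefix _).getElem (by omega)).symm
    have hp := List.mem_takeWhile_imp (List.getElem_mem (l := ks.takeWhile (fun k => decide (k ≤ c))) (by omega : n < t))
    rw [← hmem] at hp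
    simp at hp
    omega
  · exact h
  · exfalso
    have htlt : t < ks.length := lt_of_lt_of_le h hle
    have h1 := hlt t htlt h
    have h2 := takeWhile_stop (fun k => decide (k ≤ c)) ks htlt
    simp only [decide_eq_false_iff_not] at h2
    exact h2 h1

-- on a sorted list, B's 'header_lines[i-1] if i else None' equals A's scan result
theorem bisect_section_eq (ks : List Int) (c : Int)
    (hs : ks.Pairwise (fun a b => a ≤ b)) :
    (if PySem.List.bisectRight ks c = 0 then none
     else ks[PySem.List.bisectRight ks c - 1]?) = pvScanA ks c none := by
  rw [pvScanA_eq_takeWhile, Option.or_none, bisectRight_eq_takeWhile_length ks c hs]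
  set tw := ks.takeWhile (fun k => decide (k ≤ c)) with htw
  have hpre : tw <+: ks := List.takeWhile_prefix _
  by_cases h0 : tw.length = 0
  · simp [List.length_eq_zero_iff.mp h0]
  · rw [if_neg h0]
    have hlt : tw.length - 1 < tw.length := by omega
    have : ks[tw.length - 1]? = some (tw[tw.length - 1]'hlt) := by
      rw [hpre.getElem hlt]
      exact List.getElem?_eq_getElem (lt_of_lt_of_le hlt hpre.length_le)
    rw [this, List.getLast?_eq_getElem?, List.getElem?_eq_getElem hlt]

-- ===== VERDICT (by name: the statement is the Claim_ definition above) =====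
theorem find_affected_sections_spec : Claim_equal_find_affected_sections := by
  intro lines changed_lines all_headers _dom
  unfold Spec_find_affected_sections find_affected_sections find_affected_sections_alt
  simp only
  congr 1
  funext acc c
  have hs : (PySem.List.sorted (PySem.Dict.ofList all_headers).keys (fun x => x) false).Pairwise
      (fun a b => a ≤ b) := by
    simpa using PySem.List.sorted_pairwise (PySem.Dict.ofList all_headers).keys (fun x => x)
  rw [← bisect_section_eq _ c hs]
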